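-- pv_equiv track=rewrite | github.com/rebeccaserramari/polyploid-potato-assembly | clustering-phasing/cluster_phasing.py | node_to_cluster
-- ===== SOURCE A (Python) =====
-- def node_to_cluster(elems,nodeclusters):
-- 	ass = []
-- 	for el in elems:
-- 		assigned = False
-- 		for key, nodes in nodeclusters.items():
-- 			if el in nodes:
-- 				ass.append(key)
-- 				assigned = True
-- 		if not assigned:
-- 			ass.append('-')
-- 	return(ass)
-- ===== SOURCE B (Python) =====
-- def node_to_cluster(elems, nodeclusters):
--     # reverse index: node -> list of cluster keys containing it, in cluster order
--     index = {}
--     for key, nodes in nodeclusters.items():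
--         for n in dict.fromkeys(nodes):
--             index[n] = index.get(n, []) + [key]
--     return [k for el in elems for k in index.get(el, ['-'])]
-- ===== Notes on version B (the rewrite author's own statement) =====
-- stated objective: faster
-- what changed: Instead of scanning every cluster's node list for every element, B builds a reverse node-to-keys index over nodeclusters once and then answers each element with a single dictionary lookup.
import Mathlib
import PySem

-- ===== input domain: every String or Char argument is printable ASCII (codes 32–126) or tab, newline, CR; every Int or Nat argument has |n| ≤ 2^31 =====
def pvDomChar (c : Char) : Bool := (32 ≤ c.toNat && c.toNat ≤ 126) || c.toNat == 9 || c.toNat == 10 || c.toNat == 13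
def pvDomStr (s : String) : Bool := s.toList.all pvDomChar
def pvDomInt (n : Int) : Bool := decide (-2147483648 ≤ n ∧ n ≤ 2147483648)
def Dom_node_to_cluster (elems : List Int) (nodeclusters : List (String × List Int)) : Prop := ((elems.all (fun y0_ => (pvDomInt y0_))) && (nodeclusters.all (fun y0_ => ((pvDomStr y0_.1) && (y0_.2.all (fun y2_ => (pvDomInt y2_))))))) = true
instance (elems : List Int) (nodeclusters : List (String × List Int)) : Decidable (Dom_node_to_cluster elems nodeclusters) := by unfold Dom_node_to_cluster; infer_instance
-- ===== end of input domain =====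

-- B replaces A's per-element scan of all clusters by a reverse node→keys index built once,
-- then one lookup per element (asymptotically faster).

-- ===== PORT A =====
-- A: for each el, scan every cluster, append the key on membership; '-' if none matched.
def node_to_cluster (elems : List Int) (nodeclusters : List (String × List Int)) : List String :=
  elems.foldl (fun ass el =>
    let st := nodeclusters.foldl (fun (st : List String × Bool) p =>
      if el ∈ p.2 then (st.1 ++ [p.1], true) else st) (ass, false)
    if st.2 then st.1 else st.1 ++ ["-"]) []

-- ===== PORT B =====
-- build the reverse index: node -> list of keys of clusters containing it
def pvBuildIndex (nodeclusters : List (String × List Int)) : PySem.Dict Int (List String) :=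
  nodeclusters.foldl (fun idx p =>
    (PySem.List.dedup p.2).foldl (fun idx n => idx.modify n [] (· ++ [p.1])) idx) PySem.Dict.empty

def node_to_cluster_alt (elems : List Int) (nodeclusters : List (String × List Int)) : List String :=
  let idx := pvBuildIndex nodeclusters
  elems.flatMap (fun el => idx.getD el ["-"])

-- ===== PRECONDITION & SPEC =====
def Spec_node_to_cluster (elems : List Int) (nodeclusters : List (String × List Int)) (out : List String) : Prop := out = node_to_cluster_alt elems nodeclusters
instance (elems : List Int) (nodeclusters : List (String × List Int)) (out : List String) : Decidable (Spec_node_to_cluster elems nodeclusters out) := by unfold Spec_node_to_cluster; infer_instance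

-- ===== CLAIM (what is proved, stated in full; the proofs are below) =====
def Claim_equal_node_to_cluster : Prop := ∀ (elems : List Int) (nodeclusters : List (String × List Int)), Dom_node_to_cluster elems nodeclusters → Spec_node_to_cluster elems nodeclusters (node_to_cluster elems nodeclusters)

-- ===== LEMMAS AND PROOFS =====

-- the keys of the clusters containing el, in cluster order
def pvKeysOf (el : Int) (nodeclusters : List (String × List Int)) : List String :=
  (nodeclusters.filter (fun p => el ∈ p.2)).map Prod.fst

-- A's inner loop characterised
theorem pvA_inner (el : Int) (ncs : List (String × List Int)) (ass : List String) (b : Bool) :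
    ncs.foldl (fun (st : List String × Bool) p =>
      if el ∈ p.2 then (st.1 ++ [p.1], true) else st) (ass, b)
    = (ass ++ pvKeysOf el ncs, b || !(pvKeysOf el ncs).isEmpty) := by
  induction ncs generalizing ass b with
  | nil => simp [pvKeysOf]
  | cons p t ih =>
    by_cases h : el ∈ p.2
    · simp [pvKeysOf, h, ih]
    · simp [pvKeysOf, h, ih]

theorem pvA_eq_flatMap (elems : List Int) (ncs : List (String × List Int)) :
    node_to_cluster elems ncs
    = elems.flatMap (fun el => if (pvKeysOf el ncs).isEmpty then ["-"] else pvKeysOf el ncs) := by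
  unfold node_to_cluster
  rw [show (fun ass el =>
    let st := ncs.foldl (fun (st : List String × Bool) p =>
      if el ∈ p.2 then (st.1 ++ [p.1], true) else st) (ass, false)
    if st.2 then st.1 else st.1 ++ ["-"])
    = (fun ass el => ass ++ (if (pvKeysOf el ncs).isEmpty then ["-"] else pvKeysOf el ncs)) from ?_]
  · rw [PySem.List.foldl_append_eq_flatMap]; simp
  · funext ass el
    simp only [pvA_inner]
    by_cases h : (pvKeysOf el ncs).isEmpty
    · rw [List.isEmpty_iff] at h; simp [h]
    · simp [h]

-- a nodup list contributes its key once iff el is a member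
theorem pvB_cluster_nodup (el : Int) (key : String) (t : List Int) (hnd : t.Nodup) :
    ((t.map (fun n => (n, key))).filter (fun q => q.1 == el)).map Prod.snd
    = if el ∈ t then [key] else [] := by
  induction t with
  | nil => simp
  | cons x t ih =>
    simp only [List.nodup_cons] at hnd
    by_cases hx : x = el
    · subst hx
      have hfilt : (t.map (fun n => (n, key))).filter (fun q => q.1 == x) = [] := by
        rw [List.filter_eq_nil_iff]
        intro q hq
        simp only [List.mem_map] at hq
        obtain ⟨n, hn, rfl⟩ := hq
        intro he
        exact hnd.1 (beq_iff_eq.mp he ▸ hn)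
      simp [hfilt]
    · simp only [List.map_cons, List.filter_cons]
      have hb : ((x, key).1 == el) = false := by simp [hx]
      rw [hb]
      simp only [Bool.false_eq_true, if_false]
      rw [ih hnd.2]
      simp [Ne.symm hx]

-- per-cluster contribution within B's index-building loop
theorem pvB_cluster (el : Int) (key : String) (ns : List Int) :
    (((PySem.List.dedup ns).map (fun n => (n, key))).filter (fun q => q.1 == el)).map Prod.snd
    = if el ∈ ns then [key] else [] := by
  rw [pvB_cluster_nodup el key _ (PySem.List.nodup_dedup ns)]
  simp only [PySem.List.mem_dedup]

-- B's nested index-building loop as one fold over the flattened (node, key) pairs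
def pvPairs (ncs : List (String × List Int)) : List (Int × String) :=
  ncs.flatMap (fun p => (PySem.List.dedup p.2).map (fun n => (n, p.1)))

theorem pvFoldFlat {α β γ : Type} (l : List α) (f : α → List β) (g : γ → β → γ) (i : γ) :
    l.foldl (fun acc x => (f x).foldl g acc) i = (l.flatMap f).foldl g i := by
  induction l generalizing i with
  | nil => rfl
  | cons x t ih => simp [List.flatMap_cons, List.foldl_append, ih]

theorem pvBuild_eq (ncs : List (String × List Int)) :
    pvBuildIndex ncs
    = (pvPairs ncs).foldl (fun d q => d.modify q.1 [] (· ++ [q.2])) PySem.Dict.empty := by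
  unfold pvBuildIndex pvPairs
  rw [← pvFoldFlat]
  simp [List.foldl_map]

-- the flattened pairs, filtered at el, give exactly the keys of el's clusters
theorem pvPairs_filter (el : Int) (ncs : List (String × List Int)) :
    ((pvPairs ncs).filter (fun q => q.1 == el)).map Prod.snd = pvKeysOf el ncs := by
  induction ncs with
  | nil => rfl
  | cons p t ih =>
    simp only [pvPairs, List.flatMap_cons, List.filter_append, List.map_append] at *
    rw [ih, pvB_cluster el p.1 p.2]
    by_cases h : el ∈ p.2 <;> simp [pvKeysOf, h]

-- B's index characterised: lookup with default [] yields pvKeysOf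
theorem pvB_getD (el : Int) (ncs : List (String × List Int)) :
    (pvBuildIndex ncs).getD el [] = pvKeysOf el ncs := by
  rw [pvBuild_eq, PySem.Dict.getD_foldl_modify_append, pvPairs_filter]
  simp [PySem.Dict.getD_empty]

-- missing key ↔ pvKeysOf empty
theorem pvB_contains (el : Int) (ncs : List (String × List Int)) :
    (pvBuildIndex ncs).contains el = !(pvKeysOf el ncs).isEmpty := by
  rw [pvBuild_eq, PySem.Dict.contains_eq_decide_mem_keys,
      PySem.Dict.keys_foldl_modify_key (pvPairs ncs) Prod.fst]
  have hmem : el ∈ PySem.Set.update (PySem.Dict.empty (ν := List String)).keys ((pvPairs ncs).map Prod.fst)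
      ↔ pvKeysOf el ncs ≠ [] := by
    rw [PySem.Set.mem_update, ← pvPairs_filter el ncs]
    simp only [PySem.Dict.keys_empty, List.not_mem_nil, false_or, ne_eq]
    constructor
    · intro h hnil
      obtain ⟨q, hq, hq1⟩ := List.mem_map.mp h
      rw [List.map_eq_nil_iff, List.filter_eq_nil_iff] at hnil
      have := hnil q hq
      simp [hq1] at this
    · intro h
      by_contra hc
      apply h
      rw [List.map_eq_nil_iff, List.filter_eq_nil_iff]
      intro q hq he
      exact hc (List.mem_map.mpr ⟨q, hq, beq_iff_eq.mp he⟩)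
  by_cases h : pvKeysOf el ncs = []
  · rw [decide_eq_false (fun hm => (hmem.mp hm) h), h]
    rfl
  · rw [decide_eq_true (hmem.mpr h)]
    have hie : (pvKeysOf el ncs).isEmpty = false := by
      simp [h]
    rw [hie]
    rfl

theorem pvB_lookup (el : Int) (ncs : List (String × List Int)) :
    (pvBuildIndex ncs).getD el ["-"]
    = if (pvKeysOf el ncs).isEmpty then ["-"] else pvKeysOf el ncs := by
  by_cases h : (pvKeysOf el ncs).isEmpty
  · have hc : (pvBuildIndex ncs).contains el = false := by rw [pvB_contains, h]; rfl
    simp [h, PySem.Dict.getD_of_not_contains _ _ hc]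
  · have hc : (pvBuildIndex ncs).contains el = true := by rw [pvB_contains]; simp [h]
    rw [if_neg h, ← pvB_getD el ncs]
    rw [PySem.Dict.contains_eq_isSome_get?] at hc
    rw [PySem.Dict.getD_eq_get?_getD, PySem.Dict.getD_eq_get?_getD]
    cases hg : (pvBuildIndex ncs).get? el with
    | none => rw [hg] at hc; simp at hc
    | some v => simp

-- ===== VERDICT (by name: the statement is the Claim_ definition above) =====
theorem node_to_cluster_spec : Claim_equal_node_to_cluster := by
  intro elems ncs _
  unfold Spec_node_to_cluster node_to_cluster_alt
  rw [pvA_eq_flatMap]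
  simp only [pvB_lookup]
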